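-- pv_equiv track=rewrite | github.com/zeynepdundarr/Algorithms | Climbing_the_Learderboard_2.py | climbing
-- ===== SOURCE A (Python) =====
-- def climbing(rank_arr, player_arr):
--
--     rank_arr = sorted(list(set(rank_arr)), reverse = True)
--
--     j = 0
--     l = len(rank_arr)
--     res = []
--     for el in player_arr:
--         j = 0
--         while j<l and el < rank_arr[j]:
--             j += 1
--         res.append(j+1)
--     return res
-- ===== SOURCE B (Python) =====
-- def climbing(rank_arr, player_arr):
--     distinct = set(rank_arr)
--     return [1 + sum(1 for r in distinct if el < r) for el in player_arr]
-- ===== Notes on version B (the rewrite author's own statement) =====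
-- stated objective: simpler
-- what changed: B drops the sort and the per-player early-exit scan entirely: a player's rank is 1 plus the number of distinct scores strictly greater, counted directly over the set.
import Mathlib
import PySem

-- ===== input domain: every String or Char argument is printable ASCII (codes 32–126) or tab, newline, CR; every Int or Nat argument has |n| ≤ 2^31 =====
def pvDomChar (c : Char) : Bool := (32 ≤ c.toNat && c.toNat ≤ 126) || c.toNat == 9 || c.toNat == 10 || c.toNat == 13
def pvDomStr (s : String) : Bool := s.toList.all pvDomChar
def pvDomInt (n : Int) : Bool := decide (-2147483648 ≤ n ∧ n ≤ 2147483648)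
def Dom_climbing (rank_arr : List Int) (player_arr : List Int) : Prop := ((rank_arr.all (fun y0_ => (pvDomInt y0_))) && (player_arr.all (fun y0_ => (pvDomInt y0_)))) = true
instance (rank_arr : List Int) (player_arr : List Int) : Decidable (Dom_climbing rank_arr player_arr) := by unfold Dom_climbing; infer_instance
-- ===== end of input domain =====

-- B replaces A's sort + per-player early-exit scan by a direct count over the distinct-score set (simpler, no sort).


-- ===== PORT A =====
-- the 'while j<l and el < rank_arr[j]: j += 1' scan, as structural recursion on the list (j = prefix consumed)
def climbWhile (el : Int) : List Int → Int
  | [] => 0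
  | x :: t => if el < x then 1 + climbWhile el t else 0

def climbing (rank_arr : List Int) (player_arr : List Int) : List Int :=
  let ra := PySem.List.sorted (PySem.Set.ofList rank_arr) (fun x => x) true
  player_arr.foldl (fun res el => res ++ [climbWhile el ra + 1]) []

-- ===== PORT B =====
def climbing_alt (rank_arr : List Int) (player_arr : List Int) : List Int :=
  let distinct : PySem.Set Int := PySem.Set.ofList rank_arr
  player_arr.map (fun el => 1 + (distinct.map (fun r => if el < r then (1 : Int) else 0)).sum)

-- ===== PRECONDITION & SPEC =====
def Spec_climbing (rank_arr : List Int) (player_arr : List Int) (out : List Int) : Prop := out = climbing_alt rank_arr player_arr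
instance (rank_arr : List Int) (player_arr : List Int) (out : List Int) : Decidable (Spec_climbing rank_arr player_arr out) := by unfold Spec_climbing; infer_instance

-- ===== CLAIM (what is proved, stated in full; the proofs are below) =====
def Claim_equal_climbing : Prop := ∀ (rank_arr : List Int) (player_arr : List Int), Dom_climbing rank_arr player_arr → Spec_climbing rank_arr player_arr (climbing rank_arr player_arr)

-- ===== LEMMAS AND PROOFS =====

-- On a non-increasing list the early-exit scan counts exactly the elements strictly greater than el.
theorem climbWhile_eq_countP (el : Int) (xs : List Int)
    (h : xs.Pairwise (fun a b => b ≤ a)) :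
    climbWhile el xs = (xs.countP (fun r => decide (el < r)) : Int) := by
  induction xs with
  | nil => simp [climbWhile]
  | cons x t ih =>
    rcases List.pairwise_cons.mp h with ⟨hx, ht⟩
    by_cases hlt : el < x
    · simp [climbWhile, hlt, ih ht]; ring
    · have : t.countP (fun r => decide (el < r)) = 0 := by
        rw [List.countP_eq_zero]
        intro r hr
        simp only [decide_eq_true_eq]
        have := hx r hr
        omega
      simp [climbWhile, hlt, this]

theorem climbing_eq (rank_arr : List Int) (player_arr : List Int) :
    climbing rank_arr player_arr = climbing_alt rank_arr player_arr := by
  unfold climbing climbing_alt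
  rw [PySem.List.foldl_append_singleton_eq_map]
  apply List.map_congr_left
  intro el _
  have hperm : (PySem.List.sorted (PySem.Set.ofList rank_arr) (fun x => x) true).Perm
      (PySem.Set.ofList rank_arr) := PySem.List.sorted_perm _ _ _
  have hdesc : (PySem.List.sorted (PySem.Set.ofList rank_arr) (fun x => x) true).Pairwise
      (fun a b => b ≤ a) := PySem.List.sorted_pairwise_rev _ _
  have hs := PySem.List.sum_map_ite_one_zero (fun r => decide (el < r)) (PySem.Set.ofList rank_arr)
  simp only [decide_eq_true_eq] at hs
  rw [climbWhile_eq_countP el _ hdesc, hperm.countP_eq, ← hs]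
  ring

-- ===== VERDICT (by name: the statement is the Claim_ definition above) =====
theorem climbing_spec : Claim_equal_climbing := by
  intro rank_arr player_arr _
  unfold Spec_climbing
  exact climbing_eq rank_arr player_arr
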